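-- pv_equiv track=rewrite | github.com/wengangm/research_project | project_web/web/myUtil.py | sortAreas
-- ===== SOURCE A (Python) =====
-- def sortAreas(areas):
--     results={'top':[],'subArea':[]}
--     array=[]
--     for i in range(0,len(areas['top'])):
--         array.append({'top':areas['top'][i],'subArea':areas['subArea'][i]})
--     array=sorted(array,key=keyFunction)
--     for area in array:
--         area['subArea'].sort()
--         results['top'].append(area['top'])
--         results['subArea'].append(area['subArea'])
--     return results
--
-- def keyFunction(content):
--     return content['top']
-- ===== SOURCE B (Python) =====
-- def sortAreas(areas):
--     # Bucket records by their 'top' value; a stable sort of equal-key records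
--     # equals concatenating the buckets in sorted order of the distinct keys.
--     groups = {}
--     for t, s in zip(areas['top'], areas['subArea']):
--         groups.setdefault(tuple(t), []).append(s)
--     tops, subs = [], []
--     for k in sorted(groups):
--         for s in groups[k]:
--             s.sort()
--             tops.append(list(k))
--             subs.append(s)
--     return {'top': tops, 'subArea': subs}
-- ===== Notes on version B (the rewrite author's own statement) =====
-- stated objective: alternative
-- what changed: B does not sort the records at all: it buckets the (top, subArea) pairs into a dict keyed by the top value in one pass, sorts only the distinct keys, and concatenates the buckets in key order (correct because A's sort is stable, so equal-key records keep input order = bucket order).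
-- outside the precondition, e.g. on sortAreas({'top': []}): A returns {'top': [], 'subArea': []}, B raises KeyError; on sortAreas({'top': [['a']], 'subArea': []}): A raises IndexError, B returns {'top': [], 'subArea': []}; on sortAreas({}): A raises KeyError, B raises KeyError
import Mathlib
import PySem

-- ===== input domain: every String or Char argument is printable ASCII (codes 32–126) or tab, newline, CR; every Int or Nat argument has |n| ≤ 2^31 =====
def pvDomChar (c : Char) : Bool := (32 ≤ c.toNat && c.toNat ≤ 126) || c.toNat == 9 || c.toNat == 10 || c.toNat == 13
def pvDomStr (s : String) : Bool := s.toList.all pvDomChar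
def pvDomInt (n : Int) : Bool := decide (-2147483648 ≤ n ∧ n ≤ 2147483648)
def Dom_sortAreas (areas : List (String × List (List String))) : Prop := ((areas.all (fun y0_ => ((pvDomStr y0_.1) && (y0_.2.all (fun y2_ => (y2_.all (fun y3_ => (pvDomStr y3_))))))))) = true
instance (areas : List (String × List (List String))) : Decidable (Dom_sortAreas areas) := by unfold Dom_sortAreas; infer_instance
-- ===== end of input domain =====

-- B replaces A's stable sort of record dicts by a group-by: one pass buckets the (top, subArea)
-- pairs in a dict keyed by the top value, only the DISTINCT keys are sorted, and the buckets are
-- concatenated in key order (correct because A's sort is stable). Alternative decomposition.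
-- Both A and B sort the shared 'subArea' sublists in place; the equivalence proved here is about
-- the returned value.


-- dict access areas[k]: first-match lookup in the insertion-order association list
def pyLookup (areas : List (String × List (List String))) (k : String) : Option (List (List String)) :=
  areas.lookup k

-- ===== PORT A =====
def sortAreas (areas : List (String × List (List String))) : List (String × List (List String)) :=
  match pyLookup areas "top" with
  | none => []          -- KeyError 'top' (excluded by Pre_)
  | some t =>
    -- for i in range(0, len(areas['top'])): array.append({'top': …[i], 'subArea': …[i]})
    let array : List (List String × List String) :=
      (PySem.List.pyRange 0 (t.length : Int) 1).foldl
        (fun acc i =>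
          acc ++ [((PySem.List.pyGet? t i).getD [],
                   ((pyLookup areas "subArea").bind (fun s => PySem.List.pyGet? s i)).getD [])]) []
    -- array = sorted(array, key=keyFunction)
    let array2 := PySem.List.sorted array (fun c => c.1) false
    -- second loop: area['subArea'].sort(); append to results
    let results := array2.foldl
      (fun (r : List (List String) × List (List String)) area =>
        (r.1 ++ [area.1], r.2 ++ [PySem.List.sorted area.2 (fun x => x) false])) ([], [])
    [("top", results.1), ("subArea", results.2)]

-- ===== PORT B =====
-- groups = {}; for t, s in zip(top, sub): groups.setdefault(tuple(t), []).append(s)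
-- (tuple(t)/list(k) are the identity on the Lean side: the key type is List String itself)
def sortAreas_alt (areas : List (String × List (List String))) : List (String × List (List String)) :=
  match pyLookup areas "top", pyLookup areas "subArea" with
  | some t, some s =>
    let groups := (t.zip s).foldl
      (fun d p => PySem.Dict.modify d p.1 [] (fun l => l ++ [p.2])) PySem.Dict.empty
    -- for k in sorted(groups): for s in groups[k]: s.sort(); tops.append(list(k)); subs.append(s)
    let ks := PySem.List.sorted (PySem.Dict.keys groups) (fun x => x) false
    let res := ks.foldl
      (fun (r : List (List String) × List (List String)) k =>
        (PySem.Dict.getD groups k []).foldl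
          (fun r2 sub => (r2.1 ++ [k], r2.2 ++ [PySem.List.sorted sub (fun x => x) false])) r)
      ([], [])
    [("top", res.1), ("subArea", res.2)]
  | _, _ => []          -- KeyError (excluded by Pre_)

-- ===== PRECONDITION & SPEC =====
-- Pre_ excludes inputs where A raises KeyError/IndexError (missing 'top'/'subArea' key, or
-- 'subArea' shorter than 'top'); it also excludes dicts with 'top' mapped to [] and no
-- 'subArea' key, where A accidentally never touches 'subArea' and returns, while B's natural
-- unconditional lookup raises KeyError.
def Pre_sortAreas (areas : List (String × List (List String))) : Prop :=
  (pyLookup areas "top").isSome ∧ (pyLookup areas "subArea").isSome ∧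
    ((pyLookup areas "top").getD []).length ≤ ((pyLookup areas "subArea").getD []).length

instance (areas : List (String × List (List String))) : Decidable (Pre_sortAreas areas) := by
  unfold Pre_sortAreas; infer_instance

def pvWitness_sortAreas : (List (String × List (List String))) :=
  [("top", [["b"], ["a"]]), ("subArea", [["y", "x"], ["z"]])]

def Spec_sortAreas (areas : List (String × List (List String))) (out : List (String × List (List String))) : Prop := out = sortAreas_alt areas
instance (areas : List (String × List (List String))) (out : List (String × List (List String))) : Decidable (Spec_sortAreas areas out) := by unfold Spec_sortAreas; infer_instance

-- ===== CLAIM (what is proved, stated in full; the proofs are below) =====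
def Claim_equal_sortAreas : Prop := ∀ (areas : List (String × List (List String))), Dom_sortAreas areas → Pre_sortAreas areas → Spec_sortAreas areas (sortAreas areas)

-- ===== LEMMAS AND PROOFS =====

-- The stability characterisation below is stated over an ABSTRACT strict-order comparator
-- ltb : κ → κ → Bool (irreflexive, transitive, total), because the ports' List-of-String
-- order instances are not definitionally the LinearOrder instances the PySem order lemmas
-- are stated with; the comparator form applies to the ports directly.

-- insertBy passes over a prefix it is not inserted before
theorem insertBy_append_skip {α : Type} (b : α → α → Bool) (x : α) (zs ws : List α)
    (h : ∀ z ∈ zs, b x z = false) :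
    PySem.List.insertBy b x (zs ++ ws) = zs ++ PySem.List.insertBy b x ws := by
  induction zs with
  | nil => rfl
  | cons z zs ih =>
    simp only [List.cons_append, PySem.List.insertBy, h z (List.mem_cons_self),
      Bool.false_eq_true, if_false]
    rw [ih (fun z hz => h z (List.mem_cons_of_mem _ hz))]

-- insertBy lands in front when it goes before everything
theorem insertBy_front {α : Type} (b : α → α → Bool) (x : α) (ys : List α)
    (h : ∀ y ∈ ys, b x y = true) :
    PySem.List.insertBy b x ys = x :: ys := by
  cases ys with
  | nil => rfl
  | cons y ys => simp [PySem.List.insertBy, h y (List.mem_cons_self)]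

-- inserting a fresh element keeps the list pairwise-ordered
theorem pairwise_insertBy {κ : Type} (ltb : κ → κ → Bool)
    (htrans : ∀ a b c, ltb a b = true → ltb b c = true → ltb a c = true)
    (htotal : ∀ a b : κ, a ≠ b → ltb a b = true ∨ ltb b a = true)
    (x : κ) (ys : List κ)
    (hp : ys.Pairwise (fun a b => ltb a b = true)) (hx : ∀ y ∈ ys, x ≠ y) :
    (PySem.List.insertBy ltb x ys).Pairwise (fun a b => ltb a b = true) := by
  induction ys with
  | nil => simp [PySem.List.insertBy]
  | cons y t ih =>
    rcases List.pairwise_cons.mp hp with ⟨hy, hp'⟩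
    by_cases hxy : ltb x y = true
    · simp only [PySem.List.insertBy, hxy, if_true]
      refine List.pairwise_cons.mpr ⟨fun z hz => ?_, hp⟩
      rcases List.mem_cons.mp hz with h | h
      · rw [h]; exact hxy
      · exact htrans _ _ _ hxy (hy z h)
    · simp only [PySem.List.insertBy, hxy]
      refine List.pairwise_cons.mpr ⟨fun z hz => ?_, ih hp'
        (fun z hz => hx z (List.mem_cons_of_mem _ hz))⟩
      rcases (PySem.List.mem_insertBy _ _ _ _).mp hz with hzx | hzt
      · rcases htotal x y (hx y List.mem_cons_self) with h | h
        · exact absurd h hxy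
        · rw [hzx]; exact h
      · exact hy z hzt

-- inserting an element whose key already occurs: it goes to the END of its key's bucket
theorem insertBy_flatMap_mem {α κ : Type} [DecidableEq κ] (key : α → κ) (ltb : κ → κ → Bool)
    (hirr : ∀ a, ltb a a = false)
    (htrans : ∀ a b c, ltb a b = true → ltb b c = true → ltb a c = true)
    (x : α) (ks : List κ) (g : κ → List α)
    (hg : ∀ c ∈ ks, ∀ p ∈ g c, key p = c)
    (hs : ks.Pairwise (fun a b => ltb a b = true)) (hk : key x ∈ ks) :
    PySem.List.insertBy (fun a b => ltb (key a) (key b)) x (ks.flatMap g)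
      = ks.flatMap (fun c => g c ++ if c = key x then [x] else []) := by
  induction ks with
  | nil => cases hk
  | cons c ks ih =>
    rcases List.pairwise_cons.mp hs with ⟨hc, hs'⟩
    rcases List.mem_cons.mp hk with hck | hk'
    · -- c = key x : skip bucket c, then x goes in front of the rest
      subst hck
      rw [List.flatMap_cons, insertBy_append_skip _ _ _ _
          (fun z hz => by rw [hg (key x) List.mem_cons_self z hz]; exact hirr _)]
      rw [insertBy_front _ _ _ (fun y hy => by
        rcases List.mem_flatMap.mp hy with ⟨c', hc', hy'⟩
        rw [hg c' (List.mem_cons_of_mem _ hc') y hy']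
        exact hc c' hc')]
      have hnot : ∀ c' ∈ ks, ¬ (c' = key x) := fun c' hc' he => by
        have := hc c' hc'
        rw [he] at this
        exact absurd this (by simp [hirr])
      have hrest : List.flatMap (fun c => g c ++ if c = key x then [x] else []) ks
          = List.flatMap g ks :=
        List.flatMap_congr (fun c' hc' => by rw [if_neg (hnot c' hc'), List.append_nil])
      rw [List.flatMap_cons, if_pos rfl, hrest]
      simp
    · -- key x lies further right: bucket c is skipped
      have hasym : ltb (key x) c = false := by
        cases hxc : ltb (key x) c
        · rfl
        · exact absurd (htrans _ _ _ hxc (hc _ hk')) (by simp [hirr])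
      rw [List.flatMap_cons, insertBy_append_skip _ _ _ _
          (fun z hz => by rw [hg c List.mem_cons_self z hz]; exact hasym)]
      rw [ih (fun c' hc' => hg c' (List.mem_cons_of_mem _ hc')) hs' hk']
      have hne : ¬ (c = key x) := fun he => by
        have := hc _ hk'
        rw [he] at this
        exact absurd this (by simp [hirr])
      rw [List.flatMap_cons, if_neg hne, List.append_nil]

-- inserting an element with a NEW key: its key is inserted among the sorted keys
theorem insertBy_flatMap_not_mem {α κ : Type} [DecidableEq κ] (key : α → κ) (ltb : κ → κ → Bool)
    (htrans : ∀ a b c, ltb a b = true → ltb b c = true → ltb a c = true)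
    (x : α) (ks : List κ) (g : κ → List α)
    (hg : ∀ c ∈ ks, ∀ p ∈ g c, key p = c)
    (hs : ks.Pairwise (fun a b => ltb a b = true))
    (hk : key x ∉ ks) (hempty : g (key x) = []) :
    PySem.List.insertBy (fun a b => ltb (key a) (key b)) x (ks.flatMap g)
      = (PySem.List.insertBy ltb (key x) ks).flatMap
          (fun c => g c ++ if c = key x then [x] else []) := by
  induction ks with
  | nil => simp [PySem.List.insertBy, hempty]
  | cons c ks ih =>
    rcases List.pairwise_cons.mp hs with ⟨hc, hs'⟩
    have hne : key x ≠ c := fun he => hk (he ▸ List.mem_cons_self)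
    have hnot : ∀ c' ∈ c :: ks, ¬ (c' = key x) := fun c' hc' he => hk (he ▸ hc')
    by_cases hlt : ltb (key x) c = true
    · -- new key is smallest: x goes in front, key x in front of the keys
      rw [insertBy_front _ _ _ (fun y hy => by
        rcases List.mem_flatMap.mp hy with ⟨c', hc', hy'⟩
        rw [hg c' hc' y hy']
        rcases List.mem_cons.mp hc' with h2 | h2
        · exact h2 ▸ hlt
        · exact htrans _ _ _ hlt (hc c' h2))]
      rw [show PySem.List.insertBy ltb (key x) (c :: ks) = key x :: c :: ks by
        simp [PySem.List.insertBy, hlt]]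
      simp only [List.flatMap_cons]
      have hrest' : List.flatMap (fun c' => g c' ++ if c' = key x then [x] else []) ks
          = List.flatMap g ks :=
        List.flatMap_congr (fun c' hc' => by
          rw [if_neg (hnot c' (List.mem_cons_of_mem _ hc')), List.append_nil])
      rw [hrest', hempty, if_neg (hnot c List.mem_cons_self)]
      simp
    · -- key x goes further right: bucket c is skipped
      rw [List.flatMap_cons, insertBy_append_skip _ _ _ _
          (fun z hz => by rw [hg c List.mem_cons_self z hz]; exact Bool.not_eq_true _ ▸ hlt)]
      rw [ih (fun c' hc' => hg c' (List.mem_cons_of_mem _ hc')) hs'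
          (fun h => hk (List.mem_cons_of_mem _ h))]
      rw [show PySem.List.insertBy ltb (key x) (c :: ks)
            = c :: PySem.List.insertBy ltb (key x) ks by simp [PySem.List.insertBy, hlt]]
      rw [List.flatMap_cons, if_neg (fun he : c = key x => hne he.symm), List.append_nil]

-- THE stability characterisation: a stable insertion sort by key is the concatenation, over
-- the sorted distinct keys, of the input's buckets in input order.
theorem stable_sort_groups {α κ : Type} [DecidableEq κ] [BEq κ] [LawfulBEq κ] (key : α → κ)
    (ltb : κ → κ → Bool)
    (hirr : ∀ a, ltb a a = false)
    (htrans : ∀ a b c, ltb a b = true → ltb b c = true → ltb a c = true)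
    (htotal : ∀ a b : κ, a ≠ b → ltb a b = true ∨ ltb b a = true)
    (L : List α) :
    L.foldl (fun acc x => PySem.List.insertBy (fun a b => ltb (key a) (key b)) x acc) []
      = ((PySem.Set.ofList (L.map key)).foldl
            (fun acc k => PySem.List.insertBy ltb k acc) []).flatMap
          (fun c => L.filter (fun p => key p == c)) := by
  suffices h : ∀ L : List α,
      (∀ c, c ∈ (PySem.Set.ofList (L.map key)).foldl
          (fun acc k => PySem.List.insertBy ltb k acc) [] ↔ c ∈ L.map key) ∧
      ((PySem.Set.ofList (L.map key)).foldl
          (fun acc k => PySem.List.insertBy ltb k acc) []).Pairwise (fun a b => ltb a b = true) ∧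
      L.foldl (fun acc x => PySem.List.insertBy (fun a b => ltb (key a) (key b)) x acc) []
        = ((PySem.Set.ofList (L.map key)).foldl
              (fun acc k => PySem.List.insertBy ltb k acc) []).flatMap
            (fun c => L.filter (fun p => key p == c)) from (h L).2.2
  intro L
  induction L using List.reverseRecOn with
  | nil => simp
  | append_singleton L x ih =>
    obtain ⟨ihmem, ihpw, iheq⟩ := ih
    have hfilter : ∀ c : κ, (L ++ [x]).filter (fun p => key p == c)
        = L.filter (fun p => key p == c) ++ if c = key x then [x] else [] := by
      intro c
      rw [List.filter_append]
      congr 1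
      by_cases h : c = key x
      · subst h; simp
      · rw [List.filter_cons, List.filter_nil, if_neg (by simpa using fun he => h he.symm),
          if_neg h]
    have hkeys : (L ++ [x]).map key = L.map key ++ [key x] := by
      rw [List.map_append, List.map_singleton]
    have hstep : (L ++ [x]).foldl
          (fun acc x => PySem.List.insertBy (fun a b => ltb (key a) (key b)) x acc) []
        = PySem.List.insertBy (fun a b => ltb (key a) (key b)) x
            (L.foldl (fun acc x => PySem.List.insertBy (fun a b => ltb (key a) (key b)) x acc) []) := by
      rw [List.foldl_append, List.foldl_cons, List.foldl_nil]
    have hg : ∀ c ∈ (PySem.Set.ofList (L.map key)).foldl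
          (fun acc k => PySem.List.insertBy ltb k acc) [],
        ∀ p ∈ L.filter (fun p => key p == c), key p = c := by
      intro c _ p hp
      simpa using (List.mem_filter.mp hp).2
    by_cases hk : key x ∈ (L.map key : List κ)
    · -- key already present: the sorted distinct keys do not change
      have hsame : PySem.Set.ofList ((L ++ [x]).map key) = PySem.Set.ofList (L.map key) := by
        rw [hkeys, PySem.Set.ofList_append_singleton,
          PySem.Set.add_of_mem (by rw [PySem.Set.mem_ofList]; exact hk)]
      refine ⟨?_, ?_, ?_⟩
      · intro c
        rw [hsame, hkeys, ihmem c]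
        simp only [List.mem_append, List.mem_singleton]
        constructor
        · exact Or.inl
        · rintro (h | h)
          · exact h
          · exact h ▸ hk
      · rw [hsame]; exact ihpw
      · rw [hsame, hstep, iheq,
          insertBy_flatMap_mem key ltb hirr htrans x _ _ hg ihpw ((ihmem _).mpr hk)]
        exact (List.flatMap_congr (fun c _ => by rw [hfilter c])).symm
    · -- new key: it is inserted among the sorted distinct keys
      have hnew : (PySem.Set.ofList ((L ++ [x]).map key)).foldl
            (fun acc k => PySem.List.insertBy ltb k acc) []
          = PySem.List.insertBy ltb (key x)
              ((PySem.Set.ofList (L.map key)).foldl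
                (fun acc k => PySem.List.insertBy ltb k acc) []) := by
        rw [hkeys, PySem.Set.ofList_append_singleton,
          PySem.Set.add_of_not_mem (by rw [PySem.Set.mem_ofList]; exact hk),
          List.foldl_append, List.foldl_cons, List.foldl_nil]
      have hempty : L.filter (fun p => key p == key x) = [] := by
        rw [List.filter_eq_nil_iff]
        intro p hp hbeq
        exact hk (List.mem_map.mpr ⟨p, hp, eq_of_beq hbeq⟩)
      refine ⟨?_, ?_, ?_⟩
      · intro c
        rw [hnew, hkeys]
        rw [PySem.List.mem_insertBy]
        simp only [List.mem_append, List.mem_singleton]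
        rw [ihmem c]
        tauto
      · rw [hnew]
        exact pairwise_insertBy ltb htrans htotal _ _ ihpw
          (fun y hy he => hk (he ▸ (ihmem y).mp hy))
      · rw [hnew, hstep, iheq,
          insertBy_flatMap_not_mem key ltb htrans x _ _ hg ihpw
            (fun h => hk ((ihmem _).mp h)) hempty]
        exact (List.flatMap_congr (fun c _ => by rw [hfilter c])).symm

-- the index loop of A builds exactly zip(top, sub) when sub is long enough
theorem pyrange_pair_eq_zip {α β : Type} (da : α) (db : β) (t : List α) (s : List β)
    (h : t.length ≤ s.length) :
    (PySem.List.pyRange 0 (t.length : Int) 1).map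
        (fun i => ((PySem.List.pyGet? t i).getD da, (PySem.List.pyGet? s i).getD db))
      = t.zip s := by
  rw [PySem.List.pyRange_zero_natCast, List.map_map]
  apply List.ext_getElem
  · simp [h]
  · intro k h1 h2
    simp only [List.getElem_map, List.getElem_range, Function.comp_apply, List.getElem_zip]
    simp only [List.length_map, List.length_range] at h1
    rw [show ((PySem.List.pyGet? t (k : Int)).getD da) = PySem.List.pyGetD t (k : Int) da from rfl,
        show ((PySem.List.pyGet? s (k : Int)).getD db) = PySem.List.pyGetD s (k : Int) db from rfl]
    rw [PySem.List.pyGetD_eq_getElem t da (by positivity) (by exact_mod_cast h1),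
        PySem.List.pyGetD_eq_getElem s db (by positivity) (by exact_mod_cast (lt_of_lt_of_le h1 h))]
    simp

-- B's gathering double loop, flattened
theorem gather_eq {κ α β : Type} (ks : List κ) (g : κ → List α) (e : κ → β) (h : α → β)
    (a b : List β) :
    ks.foldl (fun r k => (g k).foldl (fun r2 v => (r2.1 ++ [e k], r2.2 ++ [h v])) r) (a, b)
      = (a ++ ks.flatMap (fun k => (g k).map (fun _ => e k)),
         b ++ ks.flatMap (fun k => (g k).map h)) := by
  induction ks generalizing a b with
  | nil => simp
  | cons k ks ih =>
    rw [List.foldl_cons,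
      PySem.List.foldl_prod_mk (fun l _ => l ++ [e k]) (fun l v => l ++ [h v]) (g k) a b,
      PySem.List.foldl_append_singleton_eq_map, PySem.List.foldl_append_singleton_eq_map, ih]
    simp [List.map_const']

-- ===== VERDICT (by name: the statement is the Claim_ definition above) =====
theorem sortAreas_spec : Claim_equal_sortAreas := by
  intro areas _ hpre
  unfold Spec_sortAreas sortAreas sortAreas_alt
  unfold Pre_sortAreas at hpre
  obtain ⟨h1, h2, hlen⟩ := hpre
  obtain ⟨t, htop⟩ := Option.isSome_iff_exists.mp h1
  obtain ⟨s, hsub⟩ := Option.isSome_iff_exists.mp h2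
  rw [htop, hsub] at hlen ⊢
  simp only [Option.getD_some] at hlen
  simp only [Option.bind_some]
  -- A's array is zip(top, sub)
  rw [PySem.List.foldl_append_singleton_eq_map, List.nil_append,
      pyrange_pair_eq_zip [] [] t s hlen]
  -- A's gathering loop, flattened
  rw [PySem.List.foldl_prod_mk (fun l area => l ++ [area.1])
        (fun l (area : List String × List String) =>
          l ++ [PySem.List.sorted area.2 (fun x => x) false]) _ [] [],
      PySem.List.foldl_append_singleton_eq_map,
      PySem.List.foldl_append_singleton_eq_map, List.nil_append, List.nil_append]
  -- B's groups and keys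
  rw [PySem.Dict.keys_foldl_modify_key (t.zip s) Prod.fst [] (fun _ p l => l ++ [p.2])
        PySem.Dict.empty]
  rw [show (PySem.Dict.empty : PySem.Dict (List String) (List (List String))).keys = [] from rfl,
      PySem.Set.update_nil_left]
  rw [gather_eq]
  simp only [List.nil_append]
  -- both components, via the stability characterisation
  have hchar : PySem.List.sorted (t.zip s) (fun c : List String × List String => c.1) false
      = (PySem.List.sorted (PySem.Set.ofList ((t.zip s).map Prod.fst))
            (fun x : List String => x) false).flatMap
          (fun c => (t.zip s).filter (fun p => p.1 == c)) := by
    rw [PySem.List.sorted_eq_foldl_insertBy, PySem.List.sorted_eq_foldl_insertBy]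
    exact stable_sort_groups (fun c : List String × List String => c.1)
      (fun a b : List String => decide (a < b))
      (fun a => decide_eq_false (lt_irrefl a))
      (fun a b c hab hbc =>
        decide_eq_true (lt_trans (of_decide_eq_true hab) (of_decide_eq_true hbc)))
      (fun a b hne => (lt_or_gt_of_ne hne).imp decide_eq_true decide_eq_true)
      (t.zip s)
  rw [hchar]
  congr 1
  · -- 'top' component
    congr 1
    rw [List.map_flatMap]
    apply List.flatMap_congr
    intro c _
    rw [PySem.Dict.getD_foldl_modify_append, PySem.Dict.getD_empty, List.nil_append, List.map_map]
    apply List.map_congr_left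
    intro p hp
    exact eq_of_beq (List.mem_filter.mp hp).2

  · -- 'subArea' component
    congr 2
    rw [List.map_flatMap]
    apply List.flatMap_congr
    intro c _
    rw [PySem.Dict.getD_foldl_modify_append, PySem.Dict.getD_empty, List.nil_append, List.map_map]
    rfl
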